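-- pv_equiv track=rewrite | github.com/nhamlv-55/OCCAM | razor/MLPolicy/utils.py | normalize_ptr
-- ===== SOURCE A (Python) =====
-- def normalize_ptr(insts):
--     '''
--     given a list of insts in the token-form, create a map of ptr to map from ptr0x55c5f7f542a0 to a simpler token like ptr__12
--     return the ptr_map and the new list of insts
--     '''
--     ptr_map = {}
--     new_insts = []
--     for l in insts:
--         new_tokens = []
--         tokens = l.split()
--         for t in tokens:
--             if t.startswith("ptr0x"):
--                 if t in ptr_map:
--                     t = ptr_map[t]
--                 else:
--                     ptr_map[t] = "ptr__"+str(len(ptr_map))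
--                     t = ptr_map[t]
--             new_tokens.append(t)
--         rewritten_inst = " ".join(new_tokens)
--         new_insts.append(rewritten_inst)
--     return ptr_map, new_insts
-- ===== SOURCE B (Python) =====
-- def normalize_ptr(insts):
--     ptrs = dict.fromkeys(t for l in insts for t in l.split() if t.startswith("ptr0x"))
--     ptr_map = {t: "ptr__" + str(i) for i, t in enumerate(ptrs)}
--     new_insts = [" ".join(ptr_map.get(t, t) for t in l.split()) for l in insts]
--     return ptr_map, new_insts
-- ===== Notes on version B (the rewrite author's own statement) =====
-- stated objective: alternative
-- what changed: B replaces A's single stateful pass (dict grown while rewriting each token in place) with two separate phases: flatten+filter+ordered-dedup+enumerate builds the whole ptr_map first, then a pure second pass rewrites every instruction via ptr_map.get(t, t).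
import Mathlib
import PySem

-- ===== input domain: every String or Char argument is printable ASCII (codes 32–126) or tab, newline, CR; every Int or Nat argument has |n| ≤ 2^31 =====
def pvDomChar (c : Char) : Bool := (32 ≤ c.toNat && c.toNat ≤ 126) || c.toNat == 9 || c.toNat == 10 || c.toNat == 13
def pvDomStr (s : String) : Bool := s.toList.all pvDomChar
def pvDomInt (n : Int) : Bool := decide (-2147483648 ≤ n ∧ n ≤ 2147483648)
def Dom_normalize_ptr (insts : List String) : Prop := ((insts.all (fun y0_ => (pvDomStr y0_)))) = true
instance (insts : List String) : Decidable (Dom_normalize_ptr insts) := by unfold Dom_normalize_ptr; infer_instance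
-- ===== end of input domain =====

-- B separates table construction from rewriting: it collects the pointer tokens once
-- (flatten, filter, ordered dedup, enumerate) to build ptr_map, then rewrites every
-- instruction in a second, stateless pass — instead of A's single pass that interleaves
-- dict growth with rewriting.  Objective: alternative decomposition (same asymptotic cost).

-- ===== PORT A =====
-- inner loop body of A: one token t against the state (ptr_map, new_tokens)
-- (Python's read 'ptr_map[t]' is ported as 'getD t t': in A it is only reached when t is a key)
def stepTokA (st : PySem.Dict String String × List String) (t : String) :
    PySem.Dict String String × List String :=
  if PySem.Str.startswith t "ptr0x" then
    if st.1.contains t then (st.1, st.2 ++ [st.1.getD t t])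
    else
      (st.1.insert t ("ptr__" ++ PySem.Int.toStr (st.1.size : Int)),
       st.2 ++ [(st.1.insert t ("ptr__" ++ PySem.Int.toStr (st.1.size : Int))).getD t t])
  else (st.1, st.2 ++ [t])

-- outer loop body of A: one instruction l against the state (ptr_map, new_insts)
def stepLineA (st : PySem.Dict String String × List String) (l : String) :
    PySem.Dict String String × List String :=
  let inner := (PySem.Str.split₀ l).foldl stepTokA (st.1, ([] : List String))
  (inner.1, st.2 ++ [PySem.Str.join " " inner.2])

def normalize_ptr (insts : List String) : (List (String × String)) × List String :=
  let res := insts.foldl stepLineA (PySem.Dict.empty, ([] : List String))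
  (res.1.items, res.2)

-- ===== PORT B =====
def normalize_ptr_alt (insts : List String) : (List (String × String)) × List String :=
  let ptrs := PySem.List.dedup ((insts.flatMap (fun l => PySem.Str.split₀ l)).filter
    (fun t => PySem.Str.startswith t "ptr0x"))
  let pm := PySem.Dict.ofList ((PySem.List.enumerate ptrs).map
    (fun p => (p.2, "ptr__" ++ PySem.Int.toStr p.1)))
  (pm.items,
   insts.map (fun l => PySem.Str.join " " ((PySem.Str.split₀ l).map (fun t => pm.getD t t))))

-- ===== PRECONDITION & SPEC =====
def Spec_normalize_ptr (insts : List String) (out : (List (String × String)) × List String) : Prop := out = normalize_ptr_alt insts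
instance (insts : List String) (out : (List (String × String)) × List String) : Decidable (Spec_normalize_ptr insts out) := by unfold Spec_normalize_ptr; infer_instance

-- ===== CLAIM (what is proved, stated in full; the proofs are below) =====
def Claim_equal_normalize_ptr : Prop := ∀ (insts : List String), Dom_normalize_ptr insts → Spec_normalize_ptr insts (normalize_ptr insts)

-- ===== LEMMAS AND PROOFS =====

-- abbreviations for the proof
def isPtrTok (t : String) : Bool := PySem.Str.startswith t "ptr0x"

-- the pointer table (as a key list) accumulated by A after the token stream u
def gP (u : List String) : List String := PySem.List.dedup (u.filter isPtrTok)

-- the dict "key ↦ ptr__<first-appearance index>" over a key list P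
def mkD (P : List String) : PySem.Dict String String :=
  PySem.Dict.ofList ((PySem.List.enumerate P).map (fun p => (p.2, "ptr__" ++ PySem.Int.toStr p.1)))

lemma isPtr_of_mem_gP {t : String} {u : List String} (h : t ∈ gP u) : isPtrTok t = true := by
  unfold gP at h
  rw [PySem.List.mem_dedup] at h
  exact (List.mem_filter.mp h).2

lemma dedup_snoc {α : Type} [BEq α] [LawfulBEq α] (a : List α) (t : α) :
    PySem.List.dedup (a ++ [t]) =
      if t ∈ PySem.List.dedup a then PySem.List.dedup a else PySem.List.dedup a ++ [t] := by
  simp only [PySem.List.dedup, PySem.Set.ofList, List.foldl_append, List.foldl_cons,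
    List.foldl_nil, PySem.Set.add, PySem.Set.contains]
  simp

lemma gP_snoc_nonptr {u : List String} {t : String} (h : isPtrTok t = false) :
    gP (u ++ [t]) = gP u := by
  unfold gP
  rw [List.filter_append]
  simp [h]

lemma gP_snoc_mem {u : List String} {t : String} (h : isPtrTok t = true) (hm : t ∈ gP u) :
    gP (u ++ [t]) = gP u := by
  unfold gP at hm ⊢
  rw [List.filter_append, show List.filter isPtrTok [t] = [t] by simp [h], dedup_snoc,
    if_pos hm]

lemma gP_snoc_new {u : List String} {t : String} (h : isPtrTok t = true) (hm : t ∉ gP u) :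
    gP (u ++ [t]) = gP u ++ [t] := by
  unfold gP at hm ⊢
  rw [List.filter_append, show List.filter isPtrTok [t] = [t] by simp [h], dedup_snoc,
    if_neg hm]

lemma gP_prefix (u v : List String) : gP u <+: gP (u ++ v) := by
  induction v generalizing u with
  | nil => simp
  | cons t v ih =>
    have h1 : gP u <+: gP (u ++ [t]) := by
      by_cases hp : isPtrTok t = true
      · by_cases hm : t ∈ gP u
        · rw [gP_snoc_mem hp hm]
        · rw [gP_snoc_new hp hm]
          exact List.prefix_append _ _
      · rw [gP_snoc_nonptr (by simpa using hp)]
    rw [List.append_cons]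
    exact h1.trans (ih (u ++ [t]))

lemma items_mkD {P : List String} (h : P.Nodup) :
    (mkD P).items = (PySem.List.enumerate P).map (fun p => (p.2, "ptr__" ++ PySem.Int.toStr p.1)) := by
  have hnd : (((PySem.List.enumerate P).map
      (fun p => (p.2, "ptr__" ++ PySem.Int.toStr p.1))).map Prod.fst).Nodup := by
    rw [List.map_map]
    have he : (Prod.fst ∘ fun (p : Int × String) => (p.2, "ptr__" ++ PySem.Int.toStr p.1))
        = fun (p : Int × String) => p.2 := rfl
    rw [he, PySem.List.map_snd_enumerate]
    exact h
  have key := PySem.Dict.items_foldl_insert_fresh (κ := String) (ν := String)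
    ((PySem.List.enumerate P).map (fun p => (p.2, "ptr__" ++ PySem.Int.toStr p.1)))
    Prod.fst Prod.snd PySem.Dict.empty
    (fun a _ => PySem.Dict.contains_empty _) hnd
  simpa [mkD, PySem.Dict.ofList, PySem.Dict.update] using key

lemma keys_mkD {P : List String} (h : P.Nodup) : (mkD P).keys = P := by
  simp only [PySem.Dict.keys]
  rw [items_mkD h, List.map_map]
  have he : ((fun (p : String × String) => p.1) ∘
      fun (p : Int × String) => (p.2, "ptr__" ++ PySem.Int.toStr p.1))
      = fun (p : Int × String) => p.2 := rfl
  rw [he, PySem.List.map_snd_enumerate]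

lemma size_mkD {P : List String} (h : P.Nodup) : (mkD P).size = P.length := by
  simp only [PySem.Dict.size]
  rw [items_mkD h, List.length_map, PySem.List.length_enumerate]

lemma contains_mkD {P : List String} (h : P.Nodup) (t : String) :
    (mkD P).contains t = true ↔ t ∈ P := by
  rw [PySem.Dict.contains_iff_mem_keys, keys_mkD h]

lemma getD_mkD_getElem {P : List String} (h : P.Nodup) {j : Nat} (hj : j < P.length) (d : String) :
    (mkD P).getD P[j] d = "ptr__" ++ PySem.Int.toStr (j : Int) := by
  have henum : ((j : Int), P[j]) ∈ PySem.List.enumerate P := by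
    have hg := PySem.List.getElem?_enumerate P 0 j
    rw [List.getElem?_eq_getElem hj] at hg
    simp only [Option.map_some, zero_add] at hg
    exact List.mem_of_getElem? hg
  have hitems : (P[j], "ptr__" ++ PySem.Int.toStr (j : Int)) ∈ (mkD P).items := by
    rw [items_mkD h]
    exact List.mem_map_of_mem henum
  have hk : (mkD P).keys.Nodup := by rw [keys_mkD h]; exact h
  exact PySem.Dict.getD_of_mem_items _ hitems hk d

lemma getD_mkD_not_mem {P : List String} {t : String} (h : P.Nodup) (hn : t ∉ P) :
    (mkD P).getD t t = t := by
  have hc : (mkD P).contains t = false := by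
    rw [Bool.eq_false_iff, Ne, contains_mkD h]
    exact hn
  exact PySem.Dict.getD_of_not_contains _ _ hc

lemma getD_mkD_prefix {P F : List String} (hF : F.Nodup) (hpre : P <+: F) {t : String}
    (hm : t ∈ P) : (mkD P).getD t t = (mkD F).getD t t := by
  obtain ⟨j, hj, rfl⟩ := List.getElem_of_mem hm
  have hP : P.Nodup := hF.sublist hpre.sublist
  have hjF : j < F.length := lt_of_lt_of_le hj hpre.length_le
  have he : P[j] = F[j] := hpre.getElem hj
  rw [getD_mkD_getElem hP hj]
  rw [he]
  exact (getD_mkD_getElem hF hjF F[j]).symm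

lemma mkD_snoc {P : List String} {t : String} (h : P.Nodup) (hn : t ∉ P) :
    mkD (P ++ [t]) = (mkD P).insert t ("ptr__" ++ PySem.Int.toStr (P.length : Int)) := by
  have hnd : (P ++ [t]).Nodup := by
    rw [List.nodup_append]
    refine ⟨h, List.nodup_singleton t, fun a ha b hb => ?_⟩
    simp only [List.mem_singleton] at hb
    subst hb
    exact fun e => hn (e ▸ ha)
  have hcf : (mkD P).contains t = false := by
    rw [Bool.eq_false_iff, Ne, contains_mkD h]
    exact hn
  apply PySem.Dict.ext
  rw [PySem.Dict.items_insert_of_not_contains _ _ hcf, items_mkD hnd, items_mkD h,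
    PySem.List.enumerate_append]
  simp [PySem.List.enumerate_cons, PySem.List.enumerate_nil]

lemma inner_eq (S : List String) : ∀ (ts u acc : List String),
    (∃ ext, u ++ ts ++ ext = S) →
    ts.foldl stepTokA (mkD (gP u), acc)
      = (mkD (gP (u ++ ts)),
         acc ++ ts.map (fun t => (mkD (gP S)).getD t t)) := by
  intro ts
  induction ts with
  | nil => intro u acc _; simp
  | cons t ts ih =>
    intro u acc hext
    obtain ⟨ext, hS⟩ := hext
    have hgu : (gP u).Nodup := PySem.List.nodup_dedup _
    have hSnd : (gP S).Nodup := PySem.List.nodup_dedup _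
    have hpreu : gP u <+: gP S := by
      have := gP_prefix u ((t :: ts) ++ ext)
      rwa [show u ++ ((t :: ts) ++ ext) = S by rw [← hS]; simp] at this
    have hpre1 : gP (u ++ [t]) <+: gP S := by
      have := gP_prefix (u ++ [t]) (ts ++ ext)
      rwa [show (u ++ [t]) ++ (ts ++ ext) = S by rw [← hS]; simp] at this
    by_cases hp : isPtrTok t = true
    · by_cases hm : t ∈ gP u
      · -- known pointer: dict unchanged, rewrite with existing entry
        have hp' : PySem.Str.startswith t "ptr0x" = true := hp
        have hc : (mkD (gP u)).contains t = true := (contains_mkD hgu t).mpr hm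
        have hstep : stepTokA (mkD (gP u), acc) t
            = (mkD (gP u), acc ++ [(mkD (gP u)).getD t t]) := by
          unfold stepTokA
          rw [if_pos hp', if_pos (show ((mkD (gP u), acc).1.contains t) = true from hc)]
        have hval : (mkD (gP u)).getD t t = (mkD (gP S)).getD t t :=
          getD_mkD_prefix hSnd hpreu hm
        rw [List.foldl_cons, hstep, hval, ← gP_snoc_mem hp hm,
          ih (u ++ [t]) _ ⟨ext, by rw [← hS]; simp⟩, List.append_cons u t ts]
        simp [List.append_assoc]
      · -- fresh pointer: insert, rewrite with the new entry
        have hp' : PySem.Str.startswith t "ptr0x" = true := hp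
        have hc : (mkD (gP u)).contains t = false := by
          rw [Bool.eq_false_iff, Ne, contains_mkD hgu]
          exact hm
        have hg' : gP (u ++ [t]) = gP u ++ [t] := gP_snoc_new hp hm
        have hstep : stepTokA (mkD (gP u), acc) t
            = (mkD (gP (u ++ [t])),
               acc ++ ["ptr__" ++ PySem.Int.toStr ((gP u).length : Int)]) := by
          unfold stepTokA
          rw [if_pos hp',
            if_neg (show ¬ ((mkD (gP u), acc).1.contains t) = true by simp [hc])]
          rw [PySem.Dict.getD_insert_self, size_mkD hgu, ← mkD_snoc hgu hm, ← hg']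
        have hnd2 : (gP (u ++ [t])).Nodup := PySem.List.nodup_dedup _
        have hjlt : (gP u).length < (gP (u ++ [t])).length := by rw [hg']; simp
        have hje : (gP (u ++ [t]))[(gP u).length]'hjlt = t := by
          rw [List.getElem_of_eq hg']
          exact List.getElem_concat_length rfl _
        have hmem : t ∈ gP (u ++ [t]) := by rw [hg']; simp
        have hval : (mkD (gP S)).getD t t
            = "ptr__" ++ PySem.Int.toStr ((gP u).length : Int) := by
          rw [← getD_mkD_prefix hSnd hpre1 hmem]
          have hge := getD_mkD_getElem hnd2 hjlt t
          rwa [hje] at hge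
        rw [List.foldl_cons, hstep, ih (u ++ [t]) _ ⟨ext, by rw [← hS]; simp⟩,
          List.append_cons u t ts]
        simp [List.append_assoc, hval]
    · -- not a pointer token: copied through unchanged
      have hp' : PySem.Str.startswith t "ptr0x" = false := by simpa using hp
      have hstep : stepTokA (mkD (gP u), acc) t = (mkD (gP u), acc ++ [t]) := by
        unfold stepTokA
        rw [if_neg (show ¬ (PySem.Str.startswith t "ptr0x") = true by rw [hp']; simp)]
      have hnp : isPtrTok t = false := by simpa using hp
      have hval : (mkD (gP S)).getD t t = t :=
        getD_mkD_not_mem hSnd (fun hmem => by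
          rw [isPtr_of_mem_gP hmem] at hnp
          exact Bool.noConfusion hnp)
      rw [List.foldl_cons, hstep, ← gP_snoc_nonptr hnp,
        ih (u ++ [t]) _ ⟨ext, by rw [← hS]; simp⟩, List.append_cons u t ts]
      simp [List.append_assoc, hval]

lemma outer_eq (S : List String) : ∀ (ls : List String) (u : List String) (acc : List String),
    (∃ ext, u ++ ls.flatMap (fun l => PySem.Str.split₀ l) ++ ext = S) →
    ls.foldl stepLineA (mkD (gP u), acc)
      = (mkD (gP (u ++ ls.flatMap (fun l => PySem.Str.split₀ l))),
         acc ++ ls.map (fun l =>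
           PySem.Str.join " " ((PySem.Str.split₀ l).map (fun t => (mkD (gP S)).getD t t)))) := by
  intro ls
  induction ls with
  | nil => intro u acc _; simp
  | cons l ls ih =>
    intro u acc hext
    obtain ⟨ext, hS⟩ := hext
    have hinner := inner_eq S (PySem.Str.split₀ l) u []
      ⟨ls.flatMap (fun l => PySem.Str.split₀ l) ++ ext, by rw [← hS]; simp⟩
    have hline : stepLineA (mkD (gP u), acc) l
        = (mkD (gP (u ++ PySem.Str.split₀ l)),
           acc ++ [PySem.Str.join " "
             ((PySem.Str.split₀ l).map (fun t => (mkD (gP S)).getD t t))]) := by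
      simp only [stepLineA]
      rw [hinner]
      simp
    rw [List.foldl_cons, hline,
      ih (u ++ PySem.Str.split₀ l) _ ⟨ext, by rw [← hS]; simp⟩]
    simp [List.append_assoc, List.flatMap_cons]

-- ===== VERDICT (by name: the statement is the Claim_ definition above) =====
theorem normalize_ptr_spec : Claim_equal_normalize_ptr := by
  intro insts _
  unfold Spec_normalize_ptr normalize_ptr normalize_ptr_alt
  have h := outer_eq (insts.flatMap (fun l => PySem.Str.split₀ l)) insts [] []
    ⟨[], by simp⟩
  simp only [List.nil_append] at h
  have hmk : mkD (gP []) = PySem.Dict.empty := rfl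
  rw [hmk] at h
  rw [h]
  rfl
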